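-- pv_equiv track=rewrite | github.com/raeez/chiral-bar-cobar | compute/lib/critical_line_atlas.py | class_number
-- ===== SOURCE A (Python) =====
-- from typing import Any, Dict, List, Optional, Tuple
-- import math
--
-- def class_number(D: int) -> Optional[int]:
--     r"""Class number h(D) of primitive positive definite binary quadratic forms
--     of discriminant D < 0.
--
--     A form ax^2 + bxy + cy^2 is primitive if gcd(a,b,c) = 1.
--     Reduced forms satisfy 0 <= b <= a <= c, with b >= 0 if a = c.
--     h(D) counts the number of SL_2(Z)-equivalence classes.
--
--     Valid discriminants satisfy D < 0 and D = 0 or 1 mod 4.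
--
--     Uses direct enumeration of reduced forms. Practical for |D| up to ~10^6.
--     Returns None for invalid discriminants or |D| > 10^6.
--     """
--     if D >= 0:
--         return None
--     if D % 4 not in (0, 1):
--         return None
--     abs_D = abs(D)
--     if abs_D > 10**6:
--         return None  # Too large for direct enumeration
--
--     count = 0
--     b_max = int(math.isqrt(abs_D // 3))
--
--     for b in range(0, b_max + 1):
--         rem = b * b + abs_D
--         if rem % 4 != 0:
--             continue
--         four_ac = rem
--         a_min = max(1, b) if b > 0 else 1
--         a_max = math.isqrt(four_ac // 4)
--
--         for a in range(a_min, a_max + 1):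
--             if four_ac % (4 * a) != 0:
--                 continue
--             c_val = four_ac // (4 * a)
--             if c_val < a:
--                 continue
--             # Primitive check
--             if math.gcd(math.gcd(a, b), c_val) != 1:
--                 continue
--             # Count: boundary forms (b=0, b=a, a=c) count once,
--             # interior forms count twice (for +b and -b).
--             if b == 0 or b == a or a == c_val:
--                 count += 1
--             else:
--                 count += 2
--
--     return count
-- ===== SOURCE B (Python) =====
-- import math
--
-- def class_number(D: int):
--     """Class number h(D), enumerating forms by (a, c) over an interval of c
--     and recovering b by a perfect-square test, instead of A's divisor scan."""
--     if D >= 0: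
--         return None
--     if D % 4 not in (0, 1):
--         return None
--     n = -D
--     if n > 10**6:
--         return None
--     count = 0
--     for a in range(1, math.isqrt(n // 3) + 1):
--         four_a = 4 * a
--         c_lo = max(a, -(-n // four_a))        # c >= a and 4ac >= n  (so b^2 >= 0)
--         c_hi = (n + a * a) // four_a          # 4ac - n <= a^2  (so b <= a)
--         for c in range(c_lo, c_hi + 1):
--             t = four_a * c - n
--             b = math.isqrt(t)
--             if b * b != t:
--                 continue
--             if math.gcd(math.gcd(a, b), c) != 1:
--                 continue
--             count += 1 if (b == 0 or b == a or a == c) else 2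
--     return count
-- ===== Notes on version B (the rewrite author's own statement) =====
-- stated objective: alternative
-- what changed: B enumerates forms by (a, c): for each a it walks the interval of c where c >= a and 4ac-|D| lies between zero and a squared, recovering b by an integer-square-root perfect-square test, instead of A's scan over b with an inner divisor scan over a; B needs no parity filter or divisibility test at all.
import Mathlib
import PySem

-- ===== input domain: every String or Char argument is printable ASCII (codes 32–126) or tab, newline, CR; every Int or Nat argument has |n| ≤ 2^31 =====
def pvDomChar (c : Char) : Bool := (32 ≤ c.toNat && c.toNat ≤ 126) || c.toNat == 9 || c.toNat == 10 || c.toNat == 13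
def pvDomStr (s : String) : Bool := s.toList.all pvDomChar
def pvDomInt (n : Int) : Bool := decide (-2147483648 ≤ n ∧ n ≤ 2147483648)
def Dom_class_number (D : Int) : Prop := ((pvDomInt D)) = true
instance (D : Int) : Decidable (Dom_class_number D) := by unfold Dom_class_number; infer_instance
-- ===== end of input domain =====

-- B enumerates forms by (a, c) over an interval of c, recovering b by a perfect-square
-- test, instead of A's (b, a) divisor scan (alternative algorithm, same results).

-- ===== PORT A =====
-- math.isqrt, exact on the nonnegative arguments both programs apply it to
def pyIsqrt (n : Int) : Int := (Nat.sqrt n.toNat : Int)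

def class_number (D : Int) : Option Int :=
  if D ≥ 0 then none
  else if ¬ (PySem.Int.mod D 4 = 0 ∨ PySem.Int.mod D 4 = 1) then none
  else
    let absD := |D|
    if absD > 10 ^ 6 then none
    else
      let bMax := pyIsqrt (PySem.Int.floordiv absD 3)
      some ((PySem.List.pyRange 0 (bMax + 1) 1).foldl (fun count b =>
        let rem := b * b + absD
        if PySem.Int.mod rem 4 ≠ 0 then count
        else
          let fourAC := rem
          let aMin := if b > 0 then max 1 b else 1
          let aMax := pyIsqrt (PySem.Int.floordiv fourAC 4)
          (PySem.List.pyRange aMin (aMax + 1) 1).foldl (fun count a =>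
            if PySem.Int.mod fourAC (4 * a) ≠ 0 then count
            else
              let cVal := PySem.Int.floordiv fourAC (4 * a)
              if cVal < a then count
              else if (Int.gcd (Int.gcd a b) cVal : Int) ≠ 1 then count
              else if b = 0 ∨ b = a ∨ a = cVal then count + 1
              else count + 2) count) 0)

-- ===== PORT B =====
def class_number_alt (D : Int) : Option Int :=
  if D ≥ 0 then none
  else if ¬ (PySem.Int.mod D 4 = 0 ∨ PySem.Int.mod D 4 = 1) then none
  else
    let n := -D
    if n > 10 ^ 6 then none
    else
      some ((PySem.List.pyRange 1 (pyIsqrt (PySem.Int.floordiv n 3) + 1) 1).foldl (fun count a =>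
        let fourA := 4 * a
        let cLo := max a (-(PySem.Int.floordiv (-n) fourA))
        let cHi := PySem.Int.floordiv (n + a * a) fourA
        (PySem.List.pyRange cLo (cHi + 1) 1).foldl (fun count c =>
          let t := fourA * c - n
          let b := pyIsqrt t
          if b * b ≠ t then count
          else if (Int.gcd (Int.gcd a b) c : Int) ≠ 1 then count
          else count + (if b = 0 ∨ b = a ∨ a = c then 1 else 2)) count) 0)

-- ===== PRECONDITION & SPEC =====
def Spec_class_number (D : Int) (out : Option Int) : Prop := out = class_number_alt D
instance (D : Int) (out : Option Int) : Decidable (Spec_class_number D out) := by unfold Spec_class_number; infer_instance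

-- ===== CLAIM (what is proved, stated in full; the proofs are below) =====
def Claim_equal_class_number : Prop := ∀ (D : Int), Dom_class_number D → Spec_class_number D (class_number D)

-- ===== LEMMAS AND PROOFS =====

theorem le_pyIsqrt_iff (m b : Int) (hm : 0 ≤ m) (hb : 0 ≤ b) :
    b ≤ pyIsqrt m ↔ b * b ≤ m := by
  unfold pyIsqrt
  rw [show b = (b.toNat : Int) by omega]
  rw [Int.ofNat_le, Nat.le_sqrt]
  constructor
  · intro h
    have : ((b.toNat * b.toNat : Nat) : Int) ≤ (m.toNat : Int) := by exact_mod_cast h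
    push_cast at this
    omega
  · intro h
    have : (b.toNat : Int) * (b.toNat : Int) ≤ (m.toNat : Int) := by omega
    exact_mod_cast this

theorem pyIsqrt_nonneg (m : Int) : 0 ≤ pyIsqrt m := by
  unfold pyIsqrt; positivity

theorem pyIsqrt_sq (b : Int) (hb : 0 ≤ b) : pyIsqrt (b * b) = b := by
  unfold pyIsqrt
  have h1 : (b * b).toNat = b.toNat * b.toNat := by
    rw [show b * b = ((b.toNat * b.toNat : Nat) : Int) by
      push_cast
      rw [Int.toNat_of_nonneg hb]]
    exact Int.toNat_natCast _
  rw [h1, show b.toNat * b.toNat = b.toNat ^ 2 by ring, Nat.sqrt_eq']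
  omega

theorem pyIsqrt_le (m k : Int) (h : m ≤ k) (hk : 0 ≤ k) : pyIsqrt m ≤ k := by
  unfold pyIsqrt
  have := Nat.sqrt_le_self m.toNat
  omega

theorem sum_map_pyRange (g : Int → Int) (a b : Int) :
    ((PySem.List.pyRange a b 1).map g).sum = ∑ x ∈ Finset.Ico a b, g x := by
  obtain ⟨k, hk⟩ : ∃ k : Nat, b - a ≤ k := ⟨(b - a).toNat, Int.self_le_toNat _⟩
  induction k generalizing a with
  | zero =>
    rw [PySem.List.pyRange_one_eq_nil (by omega), Finset.Ico_eq_empty (by omega)]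
    simp
  | succ k ih =>
    by_cases h : b ≤ a
    · rw [PySem.List.pyRange_one_eq_nil h, Finset.Ico_eq_empty (by omega)]
      simp
    · rw [PySem.List.pyRange_one_cons (by omega),
        ← Finset.insert_Ico_add_one_left_eq_Ico (by omega : a < b),
        Finset.sum_insert (by simp)]
      simp only [List.map_cons, List.sum_cons]
      rw [ih (a+1) (by omega)]

-- weight of the (a, b) cell in A's enumeration, as a closed-form condition
def wgt (n a b : Int) : Int :=
  if 1 ≤ a ∧ 0 ≤ b ∧ b ≤ a ∧ PySem.Int.mod (b * b + n) (4 * a) = 0 ∧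
      a ≤ PySem.Int.floordiv (b * b + n) (4 * a) ∧
      (Int.gcd (Int.gcd a b) (PySem.Int.floordiv (b * b + n) (4 * a)) : Int) = 1 then
    (if b = 0 ∨ b = a ∨ a = PySem.Int.floordiv (b * b + n) (4 * a) then 1 else 2)
  else 0

def gInner (n b a : Int) : Int :=
  if PySem.Int.mod (b * b + n) (4 * a) ≠ 0 then 0
  else if PySem.Int.floordiv (b * b + n) (4 * a) < a then 0
  else if (Int.gcd (Int.gcd a b) (PySem.Int.floordiv (b * b + n) (4 * a)) : Int) ≠ 1 then 0
  else if b = 0 ∨ b = a ∨ a = PySem.Int.floordiv (b * b + n) (4 * a) then 1 else 2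

theorem gInner_eq_wgt (n a b : Int) (h1 : 1 ≤ a) (hb : 0 ≤ b) (hba : b ≤ a) :
    gInner n b a = wgt n a b := by
  unfold gInner wgt
  split_ifs <;> first | rfl | omega

theorem wgt_bounds (n a b : Int) (hn : 3 ≤ n) (h : wgt n a b ≠ 0) :
    1 ≤ a ∧ 0 ≤ b ∧ b ≤ a ∧ a ≤ pyIsqrt (PySem.Int.floordiv n 3) ∧
      b ≤ pyIsqrt (PySem.Int.floordiv n 3) ∧
      a ≤ pyIsqrt (PySem.Int.floordiv (b * b + n) 4) := by
  have hcond : 1 ≤ a ∧ 0 ≤ b ∧ b ≤ a ∧ PySem.Int.mod (b * b + n) (4 * a) = 0 ∧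
      a ≤ PySem.Int.floordiv (b * b + n) (4 * a) ∧
      (Int.gcd (Int.gcd a b) (PySem.Int.floordiv (b * b + n) (4 * a)) : Int) = 1 := by
    by_contra hc
    exact h (by unfold wgt; rw [if_neg hc])
  obtain ⟨ha, hb, hba, hmod, hac, -⟩ := hcond
  rw [PySem.Int.mod_eq_zero_iff_dvd] at hmod
  rw [PySem.Int.floordiv_eq_ediv_of_pos (by omega)] at hac
  have hc4 : (b * b + n) / (4 * a) * (4 * a) = b * b + n := Int.ediv_mul_cancel hmod
  set c := (b * b + n) / (4 * a) with hc
  have h4a2 : 4 * (a * a) ≤ b * b + n := by nlinarith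
  have h3a2 : 3 * (a * a) ≤ n := by nlinarith
  have h3b2 : 3 * (b * b) ≤ n := by nlinarith
  refine ⟨ha, hb, hba, ?_, ?_, ?_⟩
  · rw [PySem.Int.floordiv_eq_ediv_of_pos (by norm_num),
      le_pyIsqrt_iff _ _ (by positivity) (by omega), Int.le_ediv_iff_mul_le (by norm_num)]
    omega
  · rw [PySem.Int.floordiv_eq_ediv_of_pos (by norm_num),
      le_pyIsqrt_iff _ _ (by positivity) hb, Int.le_ediv_iff_mul_le (by norm_num)]
    omega
  · rw [PySem.Int.floordiv_eq_ediv_of_pos (by norm_num),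
      le_pyIsqrt_iff _ _ (by positivity) (by omega), Int.le_ediv_iff_mul_le (by norm_num)]
    omega

def FA (n b : Int) : Int :=
  if PySem.Int.mod (b * b + n) 4 ≠ 0 then 0
  else ((PySem.List.pyRange (if b > 0 then max 1 b else 1)
      (pyIsqrt (PySem.Int.floordiv (b * b + n) 4) + 1) 1).map (gInner n b)).sum

theorem sq3_le (n : Int) (hn : 3 ≤ n) : pyIsqrt (PySem.Int.floordiv n 3) ≤ n := by
  apply pyIsqrt_le _ _ _ (by omega)
  rw [PySem.Int.floordiv_eq_ediv_of_pos (by norm_num)]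
  omega

theorem FA_eq (n b : Int) (hn : 3 ≤ n) (hb : 0 ≤ b)
    (hbs : b ≤ pyIsqrt (PySem.Int.floordiv n 3)) :
    FA n b = ∑ a ∈ Finset.Ico (0:Int) (n+1), wgt n a b := by
  by_cases hm : PySem.Int.mod (b * b + n) 4 = 0
  · rw [FA, if_neg (not_not.mpr hm), sum_map_pyRange]
    have hb2 : b * b ≤ n := by
      have h1 := (le_pyIsqrt_iff (PySem.Int.floordiv n 3) b
        (by rw [PySem.Int.floordiv_eq_ediv_of_pos (by norm_num)]; omega) hb).mp hbs
      rw [PySem.Int.floordiv_eq_ediv_of_pos (by norm_num)] at h1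
      omega
    have hsub : Finset.Ico (if b > 0 then max 1 b else 1)
        (pyIsqrt (PySem.Int.floordiv (b * b + n) 4) + 1) ⊆ Finset.Ico (0:Int) (n+1) := by
      have hle : pyIsqrt (PySem.Int.floordiv (b * b + n) 4) ≤ n := by
        apply pyIsqrt_le _ _ _ (by omega)
        rw [PySem.Int.floordiv_eq_ediv_of_pos (by norm_num)]
        omega
      intro x hx
      simp only [Finset.mem_Ico] at hx ⊢
      constructor
      · rcases hx with ⟨h1, -⟩
        split_ifs at h1 <;> omega
      · omega
    rw [Finset.sum_congr rfl (fun a ha => ?_), Finset.sum_subset hsub (fun a _ ha => ?_)]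
    · by_contra hw
      obtain ⟨h1, -, hba, hsq3, -, hsq⟩ := wgt_bounds n a b hn hw
      apply ha
      simp only [Finset.mem_Ico]
      constructor
      · split_ifs <;> omega
      · omega
    · simp only [Finset.mem_Ico] at ha
      have h1 : 1 ≤ a := by rcases ha with ⟨h, -⟩; split_ifs at h <;> omega
      have hba : b ≤ a := by rcases ha with ⟨h, -⟩; split_ifs at h <;> omega
      exact gInner_eq_wgt n a b h1 hb hba
  · rw [FA, if_pos hm]
    rw [eq_comm]
    apply Finset.sum_eq_zero
    intro a _
    unfold wgt
    rw [if_neg]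
    rintro ⟨-, -, -, hmod, -, -⟩
    apply hm
    rw [PySem.Int.mod_eq_zero_iff_dvd] at hmod ⊢
    exact dvd_trans ⟨a, by ring⟩ hmod

theorem countA_eq (n : Int) (hn : 3 ≤ n) :
    (PySem.List.pyRange 0 (pyIsqrt (PySem.Int.floordiv n 3) + 1) 1).foldl (fun count b =>
        let rem := b * b + n
        if PySem.Int.mod rem 4 ≠ 0 then count
        else
          let fourAC := rem
          let aMin := if b > 0 then max 1 b else 1
          let aMax := pyIsqrt (PySem.Int.floordiv fourAC 4)
          (PySem.List.pyRange aMin (aMax + 1) 1).foldl (fun count a =>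
            if PySem.Int.mod fourAC (4 * a) ≠ 0 then count
            else
              let cVal := PySem.Int.floordiv fourAC (4 * a)
              if cVal < a then count
              else if (Int.gcd (Int.gcd a b) cVal : Int) ≠ 1 then count
              else if b = 0 ∨ b = a ∨ a = cVal then count + 1
              else count + 2) count) 0
      = ∑ b ∈ Finset.Ico (0:Int) (n+1), ∑ a ∈ Finset.Ico (0:Int) (n+1), wgt n a b := by
  set sq3 := pyIsqrt (PySem.Int.floordiv n 3) with hsq3
  refine Eq.trans (PySem.List.foldl_congr_mem' _ _
      (fun (count : Int) (b : Int) => count + FA n b) 0 ?_) ?_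
  swap
  · rw [PySem.List.foldl_add, zero_add, sum_map_pyRange]
    have h3 : ∑ b ∈ Finset.Ico (0:Int) (sq3+1), FA n b
        = ∑ b ∈ Finset.Ico (0:Int) (sq3+1), ∑ a ∈ Finset.Ico (0:Int) (n+1), wgt n a b :=
      Finset.sum_congr rfl (fun b hb => FA_eq n b hn (Finset.mem_Ico.mp hb).1
        (by have := (Finset.mem_Ico.mp hb).2; omega))
    have h4 : ∑ b ∈ Finset.Ico (0:Int) (sq3+1), ∑ a ∈ Finset.Ico (0:Int) (n+1), wgt n a b
        = ∑ b ∈ Finset.Ico (0:Int) (n+1), ∑ a ∈ Finset.Ico (0:Int) (n+1), wgt n a b :=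
      Finset.sum_subset (Finset.Ico_subset_Ico le_rfl (by have := sq3_le n hn; omega))
        (fun b hb1 hb2 => Finset.sum_eq_zero (fun a _ => by
          by_contra hw
          obtain ⟨-, -, -, -, hbs, -⟩ := wgt_bounds n a b hn hw
          rw [← hsq3] at hbs
          simp only [Finset.mem_Ico] at hb1 hb2
          omega))
    rw [h3, h4]
  · intro b hb count
    rw [PySem.List.mem_pyRange_one] at hb
    dsimp only
    by_cases hm : PySem.Int.mod (b * b + n) 4 ≠ 0
    · rw [if_pos hm, FA, if_pos hm, add_zero]
    · rw [if_neg hm, FA, if_neg hm]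
      rw [show (fun (count : Int) (a : Int) =>
            if PySem.Int.mod (b * b + n) (4 * a) ≠ 0 then count
            else
              let cVal := PySem.Int.floordiv (b * b + n) (4 * a)
              if cVal < a then count
              else if (Int.gcd (Int.gcd a b) cVal : Int) ≠ 1 then count
              else if b = 0 ∨ b = a ∨ a = cVal then count + 1
              else count + 2) = (fun count a => count + gInner n b a) by
          funext count a
          simp only [gInner]
          split_ifs <;> ring]
      rw [PySem.List.foldl_add]

-- weight of a full triple (a, b, c): nonzero only on reduced primitive forms of -n
def pairW (n a b c : Int) : Int :=
  if 1 ≤ a ∧ 0 ≤ b ∧ b ≤ a ∧ a ≤ c ∧ b * b + n = 4 * a * c ∧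
      (Int.gcd (Int.gcd a b) c : Int) = 1 then
    (if b = 0 ∨ b = a ∨ a = c then 1 else 2)
  else 0

-- weight of the (a, c) cell in B's enumeration, as a closed-form condition
def wgt2 (n a c : Int) : Int :=
  if 1 ≤ a ∧ a ≤ c ∧ n ≤ 4 * a * c ∧ 4 * a * c - n ≤ a * a ∧
      pyIsqrt (4 * a * c - n) * pyIsqrt (4 * a * c - n) = 4 * a * c - n ∧
      (Int.gcd (Int.gcd a (pyIsqrt (4 * a * c - n))) c : Int) = 1 then
    (if pyIsqrt (4 * a * c - n) = 0 ∨ pyIsqrt (4 * a * c - n) = a ∨ a = c then 1 else 2)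
  else 0

def gInner2 (n a c : Int) : Int :=
  if pyIsqrt (4 * a * c - n) * pyIsqrt (4 * a * c - n) ≠ 4 * a * c - n then 0
  else if (Int.gcd (Int.gcd a (pyIsqrt (4 * a * c - n))) c : Int) ≠ 1 then 0
  else if pyIsqrt (4 * a * c - n) = 0 ∨ pyIsqrt (4 * a * c - n) = a ∨ a = c then 1 else 2

theorem gInner2_eq_wgt2 (n a c : Int) (h1 : 1 ≤ a) (hac : a ≤ c)
    (hge : n ≤ 4 * a * c) (hle : 4 * a * c - n ≤ a * a) :
    gInner2 n a c = wgt2 n a c := by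
  unfold gInner2 wgt2
  split_ifs <;> first | rfl | omega

-- the c-sum of pairW collapses to A's weight at c = (b²+n)/(4a)
theorem wgt_eq_sum_pairW (n a b : Int) (hn : 3 ≤ n) :
    wgt n a b = ∑ c ∈ Finset.Ico (0:Int) (n+1), pairW n a b c := by
  by_cases hc : 1 ≤ a ∧ 0 ≤ b ∧ b ≤ a ∧ PySem.Int.mod (b * b + n) (4 * a) = 0 ∧
      a ≤ PySem.Int.floordiv (b * b + n) (4 * a) ∧
      (Int.gcd (Int.gcd a b) (PySem.Int.floordiv (b * b + n) (4 * a)) : Int) = 1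
  · obtain ⟨ha, hb, hba, hmod, hac, hg⟩ := hc
    rw [PySem.Int.mod_eq_zero_iff_dvd] at hmod
    rw [PySem.Int.floordiv_eq_ediv_of_pos (by omega)] at hac hg
    have hc4 : (b * b + n) / (4 * a) * (4 * a) = b * b + n := Int.ediv_mul_cancel hmod
    set c0 := (b * b + n) / (4 * a) with hc0
    have hcval : b * b + n = 4 * a * c0 := by linarith [hc4]
    have hc0n : c0 ≤ n := by nlinarith
    have hmem : c0 ∈ Finset.Ico (0:Int) (n+1) := Finset.mem_Ico.mpr ⟨by omega, by omega⟩
    have hfd : PySem.Int.floordiv (b * b + n) (4 * a) = c0 := by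
      rw [PySem.Int.floordiv_eq_ediv_of_pos (by omega), ← hc0]
    rw [Finset.sum_eq_single_of_mem c0 hmem (fun c _ hne => ?_)]
    · have hw : 1 ≤ a ∧ 0 ≤ b ∧ b ≤ a ∧ PySem.Int.mod (b * b + n) (4 * a) = 0 ∧
          a ≤ c0 ∧ (Int.gcd (Int.gcd a b) c0 : Int) = 1 :=
        ⟨ha, hb, hba, by rw [PySem.Int.mod_eq_zero_iff_dvd]; exact hmod, hac, hg⟩
      have hp : 1 ≤ a ∧ 0 ≤ b ∧ b ≤ a ∧ a ≤ c0 ∧ b * b + n = 4 * a * c0 ∧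
          (Int.gcd (Int.gcd a b) c0 : Int) = 1 := ⟨ha, hb, hba, hac, hcval, hg⟩
      unfold wgt pairW
      rw [hfd, if_pos hw, if_pos hp]
    · unfold pairW
      rw [if_neg]
      rintro ⟨-, -, -, -, heq, -⟩
      apply hne
      have h4 : (4 * a) * c = (4 * a) * c0 := by linarith [heq, hcval]
      exact mul_left_cancel₀ (by omega : (4 * a) ≠ 0) h4
  · rw [wgt, if_neg hc, eq_comm]
    apply Finset.sum_eq_zero
    intro c _
    unfold pairW
    rw [if_neg]
    rintro ⟨ha, hb, hba, hac, heq, hg⟩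
    apply hc
    have hdvd : (4 * a) ∣ (b * b + n) := ⟨c, by omega⟩
    have hfd : PySem.Int.floordiv (b * b + n) (4 * a) = c := by
      rw [PySem.Int.floordiv_eq_ediv_of_pos (by omega), heq,
        show (4 * a * c) = (4 * a) * c by ring, Int.mul_ediv_cancel_left _ (by omega)]
    refine ⟨ha, hb, hba, ?_, ?_, ?_⟩
    · rw [PySem.Int.mod_eq_zero_iff_dvd]; exact hdvd
    · rw [hfd]; exact hac
    · rw [hfd]; exact hg

-- the b-sum of pairW collapses to B's weight at b = isqrt(4ac − n)
theorem wgt2_eq_sum_pairW (n a c : Int) (_hn : 3 ≤ n) (hc : c ≤ n) :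
    wgt2 n a c = ∑ b ∈ Finset.Ico (0:Int) (n+1), pairW n a b c := by
  by_cases hcd : 1 ≤ a ∧ a ≤ c ∧ n ≤ 4 * a * c ∧ 4 * a * c - n ≤ a * a ∧
      pyIsqrt (4 * a * c - n) * pyIsqrt (4 * a * c - n) = 4 * a * c - n ∧
      (Int.gcd (Int.gcd a (pyIsqrt (4 * a * c - n))) c : Int) = 1
  · obtain ⟨ha, hac, hge, hle, hsq, hg⟩ := hcd
    set b0 := pyIsqrt (4 * a * c - n) with hb0
    have hb0n : 0 ≤ b0 := pyIsqrt_nonneg _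
    have hb0a : b0 ≤ a := by nlinarith
    have han : a ≤ n := by omega
    have hmem : b0 ∈ Finset.Ico (0:Int) (n+1) := Finset.mem_Ico.mpr ⟨hb0n, by omega⟩
    rw [Finset.sum_eq_single_of_mem b0 hmem (fun b hbm hne => ?_)]
    · have hw : 1 ≤ a ∧ a ≤ c ∧ n ≤ 4 * a * c ∧ 4 * a * c - n ≤ a * a ∧
          b0 * b0 = 4 * a * c - n ∧ (Int.gcd (Int.gcd a b0) c : Int) = 1 :=
        ⟨ha, hac, hge, hle, hsq, hg⟩
      have hp : 1 ≤ a ∧ 0 ≤ b0 ∧ b0 ≤ a ∧ a ≤ c ∧ b0 * b0 + n = 4 * a * c ∧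
          (Int.gcd (Int.gcd a b0) c : Int) = 1 := ⟨ha, hb0n, hb0a, hac, by omega, hg⟩
      unfold wgt2 pairW
      rw [← hb0, if_pos hw, if_pos hp]
    · unfold pairW
      rw [if_neg]
      rintro ⟨-, hbnn, -, -, heq, -⟩
      apply hne
      rw [hb0, show 4 * a * c - n = b * b by omega, pyIsqrt_sq b hbnn]
  · rw [wgt2, if_neg hcd, eq_comm]
    apply Finset.sum_eq_zero
    intro b _
    unfold pairW
    rw [if_neg]
    rintro ⟨ha, hb, hba, hac, heq, hg⟩
    apply hcd
    have ht : 4 * a * c - n = b * b := by omega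
    have hsq : pyIsqrt (4 * a * c - n) = b := by rw [ht, pyIsqrt_sq b hb]
    refine ⟨ha, hac, by nlinarith, by rw [ht]; nlinarith, by rw [hsq, ht], by rw [hsq]; exact hg⟩

-- B's c-range agrees with wgt2's closed-form inequalities
theorem cLo_le_iff (n a c : Int) (ha : 1 ≤ a) :
    -(PySem.Int.floordiv (-n) (4 * a)) ≤ c ↔ n ≤ 4 * a * c := by
  rw [PySem.Int.floordiv_eq_ediv_of_pos (by omega), neg_le,
    Int.le_ediv_iff_mul_le (by omega : (0:Int) < 4 * a)]
  constructor <;> intro h <;> nlinarith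

theorem cHi_ge_iff (n a c : Int) (ha : 1 ≤ a) :
    c ≤ PySem.Int.floordiv (n + a * a) (4 * a) ↔ 4 * a * c ≤ n + a * a := by
  rw [PySem.Int.floordiv_eq_ediv_of_pos (by omega),
    Int.le_ediv_iff_mul_le (by omega : (0:Int) < 4 * a)]
  constructor <;> intro h <;> nlinarith

def FB (n a : Int) : Int :=
  ((PySem.List.pyRange (max a (-(PySem.Int.floordiv (-n) (4 * a))))
      (PySem.Int.floordiv (n + a * a) (4 * a) + 1) 1).map (gInner2 n a)).sum

theorem FB_eq (n a : Int) (hn : 3 ≤ n) (ha : 1 ≤ a)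
    (has : a ≤ pyIsqrt (PySem.Int.floordiv n 3)) :
    FB n a = ∑ c ∈ Finset.Ico (0:Int) (n+1), wgt2 n a c := by
  have ha2 : a * a * 3 ≤ n := by
    have := (le_pyIsqrt_iff (PySem.Int.floordiv n 3) a
      (by rw [PySem.Int.floordiv_eq_ediv_of_pos (by norm_num)]; omega) (by omega)).mp has
    rw [PySem.Int.floordiv_eq_ediv_of_pos (by norm_num),
      Int.le_ediv_iff_mul_le (by norm_num : (0:Int) < 3)] at this
    omega
  have hhi : PySem.Int.floordiv (n + a * a) (4 * a) ≤ n := by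
    by_contra h
    rw [not_le] at h
    have := (cHi_ge_iff n a (n + 1) ha).mp (by omega)
    nlinarith
  have hsub : Finset.Ico (max a (-(PySem.Int.floordiv (-n) (4 * a))))
      (PySem.Int.floordiv (n + a * a) (4 * a) + 1) ⊆ Finset.Ico (0:Int) (n+1) := by
    intro x hx
    simp only [Finset.mem_Ico, max_le_iff] at hx ⊢
    omega
  rw [FB, sum_map_pyRange,
    Finset.sum_congr rfl (fun c hcm => ?_), Finset.sum_subset hsub (fun c _ hcm => ?_)]
  · unfold wgt2
    rw [if_neg]
    rintro ⟨-, hac, hge, hle, -, -⟩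
    apply hcm
    simp only [Finset.mem_Ico, max_le_iff]
    exact ⟨⟨hac, (cLo_le_iff n a c ha).mpr hge⟩, by have := (cHi_ge_iff n a c ha).mpr (by omega); omega⟩
  · simp only [Finset.mem_Ico, max_le_iff] at hcm
    obtain ⟨⟨hac, hlo⟩, hhi'⟩ := hcm
    exact gInner2_eq_wgt2 n a c ha hac ((cLo_le_iff n a c ha).mp hlo)
      (by have := (cHi_ge_iff n a c ha).mp (by omega); omega)

theorem countB_eq (n : Int) (hn : 3 ≤ n) :
    (PySem.List.pyRange 1 (pyIsqrt (PySem.Int.floordiv n 3) + 1) 1).foldl (fun count a =>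
        let fourA := 4 * a
        let cLo := max a (-(PySem.Int.floordiv (-n) fourA))
        let cHi := PySem.Int.floordiv (n + a * a) fourA
        (PySem.List.pyRange cLo (cHi + 1) 1).foldl (fun count c =>
          let t := fourA * c - n
          let b := pyIsqrt t
          if b * b ≠ t then count
          else if (Int.gcd (Int.gcd a b) c : Int) ≠ 1 then count
          else count + (if b = 0 ∨ b = a ∨ a = c then 1 else 2)) count) 0
      = ∑ a ∈ Finset.Ico (0:Int) (n+1), ∑ c ∈ Finset.Ico (0:Int) (n+1), wgt2 n a c := by
  set sq3 := pyIsqrt (PySem.Int.floordiv n 3) with hsq3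
  refine Eq.trans (PySem.List.foldl_congr_mem' _ _
      (fun (count : Int) (a : Int) => count + FB n a) 0 ?_) ?_
  swap
  · rw [PySem.List.foldl_add, zero_add, sum_map_pyRange]
    have h3 : ∑ a ∈ Finset.Ico (1:Int) (sq3+1), FB n a
        = ∑ a ∈ Finset.Ico (1:Int) (sq3+1), ∑ c ∈ Finset.Ico (0:Int) (n+1), wgt2 n a c :=
      Finset.sum_congr rfl (fun a ha => FB_eq n a hn (Finset.mem_Ico.mp ha).1
        (by have := (Finset.mem_Ico.mp ha).2; omega))
    have h4 : ∑ a ∈ Finset.Ico (1:Int) (sq3+1), ∑ c ∈ Finset.Ico (0:Int) (n+1), wgt2 n a c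
        = ∑ a ∈ Finset.Ico (0:Int) (n+1), ∑ c ∈ Finset.Ico (0:Int) (n+1), wgt2 n a c :=
      Finset.sum_subset (Finset.Ico_subset_Ico (by norm_num) (by have := sq3_le n hn; omega))
        (fun a ha1 ha2 => Finset.sum_eq_zero (fun c _ => by
          unfold wgt2
          rw [if_neg]
          rintro ⟨ha, hac, hge, hle, -, -⟩
          simp only [Finset.mem_Ico] at ha1 ha2
          have hasq : a ≤ sq3 := by
            rw [hsq3]
            rw [le_pyIsqrt_iff _ _
              (by rw [PySem.Int.floordiv_eq_ediv_of_pos (by norm_num)]; omega) (by omega),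
              PySem.Int.floordiv_eq_ediv_of_pos (by norm_num),
              Int.le_ediv_iff_mul_le (by norm_num : (0:Int) < 3)]
            nlinarith
          omega))
    rw [h3, h4]
  · intro a ha count
    dsimp only
    rw [show (fun (count : Int) (c : Int) =>
          if pyIsqrt (4 * a * c - n) * pyIsqrt (4 * a * c - n) ≠ 4 * a * c - n then count
          else if (Int.gcd (Int.gcd a (pyIsqrt (4 * a * c - n))) c : Int) ≠ 1 then count
          else count + (if pyIsqrt (4 * a * c - n) = 0 ∨ pyIsqrt (4 * a * c - n) = a ∨ a = c then 1 else 2))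
        = (fun count c => count + gInner2 n a c) by
        funext count c
        simp only [gInner2]
        split_ifs <;> ring]
    rw [PySem.List.foldl_add, FB]

-- ===== VERDICT (by name: the statement is the Claim_ definition above) =====
theorem class_number_spec : Claim_equal_class_number := by
  intro D _
  unfold Spec_class_number class_number class_number_alt
  by_cases h0 : D ≥ 0
  · rw [if_pos h0, if_pos h0]
  · rw [if_neg h0, if_neg h0]
    by_cases h1 : ¬ (PySem.Int.mod D 4 = 0 ∨ PySem.Int.mod D 4 = 1)
    · rw [if_pos h1, if_pos h1]
    · rw [if_neg h1, if_neg h1]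
      have hD : PySem.Int.mod D 4 = 0 ∨ PySem.Int.mod D 4 = 1 := not_not.mp h1
      rw [PySem.Int.mod_eq_emod_of_pos (by norm_num)] at hD
      have habs : |D| = -D := abs_of_neg (by omega)
      have hn : 3 ≤ -D := by omega
      by_cases h2 : -D > 10 ^ 6
      · dsimp only
        rw [if_pos (by omega : |D| > 10 ^ 6), if_pos h2]
      · dsimp only
        rw [if_neg (by omega : ¬ |D| > 10 ^ 6), if_neg h2]
        refine congrArg some ?_
        have hA := countA_eq (-D) hn
        have hB := countB_eq (-D) hn
        dsimp only at hA hB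
        rw [habs, hA, hB]
        rw [Finset.sum_comm (γ := Int) (s := Finset.Ico (0:Int) (-D+1))]
        refine Finset.sum_congr rfl (fun a _ => ?_)
        rw [Finset.sum_congr rfl (fun c hc => wgt2_eq_sum_pairW (-D) a c hn
            (by have := (Finset.mem_Ico.mp hc).2; omega)),
          Finset.sum_comm]
        exact Finset.sum_congr rfl fun b _ => wgt_eq_sum_pairW (-D) a b hn
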